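-- pv_equiv track=rewrite | github.com/Midorina/Shinobu | mido_utils/converters.py | html_to_discord
-- ===== SOURCE A (Python) =====
-- def html_to_discord(text: str):
--     a = {
--         "<b>"   : "**",
--         "<i>"   : "*",
--         "<del>" : "~~",
--         "<ins>" : "__",
--         "&nbsp;": " "
--     }
--
--     for start, to_place in a.items():
--         end = start[0] + '/' + start[1:]
--
--         text = text.replace(start, str(to_place))
--         text = text.replace(end, str(to_place))
--
--     # todo: fix consecutive html tags
--     # for d in a.values():
--     #     if d*2 in text:
--     #         text = text.replace(d*2, d + ' ')
--
--     return text
-- ===== SOURCE B (Python) =====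
-- def html_to_discord(text: str):
--     base = {
--         "<b>"   : "**",
--         "<i>"   : "*",
--         "<del>" : "~~",
--         "<ins>" : "__",
--         "&nbsp;": " "
--     }
--     # one token table: each opening tag plus its derived closing form "start[0] + '/' + start[1:]"
--     mapping = {}
--     for start, to_place in base.items():
--         mapping[start] = to_place
--         mapping[start[0] + '/' + start[1:]] = to_place
--
--     out = []
--     i = 0
--     n = len(text)
--     while i < n:
--         for tok, rep in mapping.items():
--             if text.startswith(tok, i):
--                 out.append(rep)
--                 i += len(tok)
--                 break
--         else:
--             out.append(text[i])
--             i += 1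
--     return ''.join(out)
-- ===== Notes on version B (the rewrite author's own statement) =====
-- stated objective: alternative
-- what changed: B builds one token->replacement table (including the derived closing forms) and rewrites the text in a single left-to-right scan, instead of A's ten successive whole-string .replace passes.
import Mathlib
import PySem

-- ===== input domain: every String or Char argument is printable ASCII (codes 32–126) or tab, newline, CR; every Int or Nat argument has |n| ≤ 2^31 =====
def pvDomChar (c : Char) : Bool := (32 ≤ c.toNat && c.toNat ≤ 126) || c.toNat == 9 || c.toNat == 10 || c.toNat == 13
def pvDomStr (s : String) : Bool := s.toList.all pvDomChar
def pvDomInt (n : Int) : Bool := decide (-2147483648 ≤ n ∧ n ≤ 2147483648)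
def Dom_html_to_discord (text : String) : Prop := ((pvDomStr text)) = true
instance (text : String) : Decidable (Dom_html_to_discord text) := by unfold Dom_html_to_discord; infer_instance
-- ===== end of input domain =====

-- B replaces A's ten repeated whole-string .replace passes by a single left-to-right scan
-- over a token table built once (objective: alternative, same result in one pass).

-- ===== PORT A =====
-- A iterates over the dict items; per item it derives end = start[0] + '/' + start[1:]
-- (start is a nonempty literal, so the pyGet? below is always `some`) and replaces both.
def html_to_discord (text : String) : String :=
  [("<b>", "**"), ("<i>", "*"), ("<del>", "~~"), ("<ins>", "__"), ("&nbsp;", " ")].foldl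
    (fun text p =>
      let start := p.1
      let to_place := p.2
      let e := ((PySem.Str.pyGet? start 0).map String.singleton).getD "" ++ "/" ++
        PySem.Str.slice start (some 1) none
      let text := PySem.Str.replace text start to_place
      PySem.Str.replace text e to_place)
    text

-- ===== PORT B =====
-- token table of Source B: for each base item insert start and the derived closing form
def pvMapping : List (List Char × List Char) :=
  [("<b>", "**"), ("<i>", "*"), ("<del>", "~~"), ("<ins>", "__"), ("&nbsp;", " ")].foldl
    (fun m p =>
      let start := p.1.toList
      let e := start.take 1 ++ ['/'] ++ start.tail
      m ++ [(start, p.2.toList), (e, p.2.toList)]) []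

-- the inner `for tok, rep in mapping.items(): if text.startswith(tok, i)` loop of Source B
def pvFind (toks : List (List Char × List Char)) (l : List Char) :
    Option (List Char × List Char) :=
  match toks with
  | [] => none
  | p :: rest => if p.1.isPrefixOf l then some p else pvFind rest l

-- termination helper for the scan: pvFind only returns members of the table
theorem pvFind_mem {toks : List (List Char × List Char)} {l : List Char}
    {q : List Char × List Char} (h : pvFind toks l = some q) : q ∈ toks := by
  induction toks with
  | nil => simp [pvFind] at h
  | cons p rest ih =>
    by_cases hp : p.1.isPrefixOf l
    · simp [pvFind, hp] at h; simp [h]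
    · simp [pvFind, hp] at h; exact List.mem_cons_of_mem _ (ih h)

set_option maxRecDepth 4000 in
theorem pvMapping_keys_pos : ∀ q ∈ pvMapping, 0 < q.1.length := by decide

-- the `while i < n` loop of Source B: one left-to-right pass emitting replacements
def pvScan : List Char → List Char
  | [] => []
  | c :: t =>
    match h : pvFind pvMapping (c :: t) with
    | some q => q.2 ++ pvScan ((c :: t).drop q.1.length)
    | none => c :: pvScan t
termination_by l => l.length
decreasing_by
  · have := pvMapping_keys_pos _ (pvFind_mem h)
    simp [List.length_drop]; omega
  · simp

def html_to_discord_alt (text : String) : String :=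
  String.ofList (pvScan text.toList)

-- ===== PRECONDITION & SPEC =====
def Spec_html_to_discord (text : String) (out : String) : Prop := out = html_to_discord_alt text
instance (text : String) (out : String) : Decidable (Spec_html_to_discord text out) := by unfold Spec_html_to_discord; infer_instance

-- ===== CLAIM (what is proved, stated in full; the proofs are below) =====
def Claim_equal_html_to_discord : Prop := ∀ (text : String), Dom_html_to_discord text → Spec_html_to_discord text (html_to_discord text)

-- ===== LEMMAS AND PROOFS =====

set_option maxRecDepth 4000 in
theorem pvMapping_eq : pvMapping =
    [(['<', 'b', '>'], ['*', '*']), (['<', '/', 'b', '>'], ['*', '*']),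
     (['<', 'i', '>'], ['*']), (['<', '/', 'i', '>'], ['*']),
     (['<', 'd', 'e', 'l', '>'], ['~', '~']), (['<', '/', 'd', 'e', 'l', '>'], ['~', '~']),
     (['<', 'i', 'n', 's', '>'], ['_', '_']), (['<', '/', 'i', 'n', 's', '>'], ['_', '_']),
     (['&', 'n', 'b', 's', 'p', ';'], [' ']), (['&', '/', 'n', 'b', 's', 'p', ';'], [' '])] := by
  decide

-- structural characterisation of Python str.replace (nonempty pattern)
def pvRep (t r : List Char) : List Char → List Char
  | [] => []
  | c :: tl =>
    if t ≠ [] ∧ t.isPrefixOf (c :: tl) then r ++ pvRep t r ((c :: tl).drop t.length)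
    else c :: pvRep t r tl
termination_by l => l.length
decreasing_by
  · rename_i h
    have : 0 < t.length := List.length_pos_iff.mpr h.1
    simp [List.length_drop]; omega
  · simp

theorem go_eq (old new : List Char) (hold : old ≠ []) :
    ∀ (fuel : Nat) (l acc : List Char), l.length ≤ fuel →
      PySem.Chars.replace.go old new fuel l acc = acc.reverse ++ pvRep old new l := by
  intro fuel
  induction fuel with
  | zero =>
    intro l acc hl
    have : l = [] := List.length_eq_zero_iff.mp (Nat.le_zero.mp hl)
    subst this
    simp [PySem.Chars.replace.go, pvRep]
  | succ n ih =>
    intro l acc hl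
    cases l with
    | nil => simp [PySem.Chars.replace.go, pvRep]
    | cons c t =>
      by_cases hp : old.isPrefixOf (c :: t)
      · have hpos : 0 < old.length := List.length_pos_iff.mpr hold
        have hdrop : ((c :: t).drop old.length).length ≤ n := by
          simp [List.length_drop]
          simp at hl; omega
        simp only [PySem.Chars.replace.go, hp, if_pos]
        rw [ih _ _ hdrop]
        simp [pvRep, hp, hold]
      · simp only [PySem.Chars.replace.go, hp]
        rw [if_neg (by simp [hp])]
        rw [ih t (c :: acc) (by simp at hl ⊢; omega)]
        simp [pvRep, hp]

theorem replace_eq_pvRep (s old new : List Char) (hold : old ≠ []) :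
    PySem.Chars.replace s old new = pvRep old new s := by
  unfold PySem.Chars.replace
  rw [if_neg (by simp [hold])]
  rw [go_eq old new hold s.length s [] le_rfl]
  simp

-- a prefix transfers heads
theorem head?_of_prefix {s l : List Char} (h : s <+: l) (hs : s ≠ []) :
    l.head? = s.head? := by
  obtain ⟨u, rfl⟩ := h
  cases s with
  | nil => exact absurd rfl hs
  | cons a b => simp

-- survival: a nonempty piece whose chars are never the replacement head stays
-- absent from the head of the string under pvRep
theorem pvRep_not_prefix (t r : List Char) (hr : r ≠ []) :
    ∀ (l s : List Char), s ≠ [] → (∀ x ∈ s, r.head? ≠ some x) → ¬ s <+: l →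
      ¬ s <+: pvRep t r l := by
  intro l
  induction l with
  | nil =>
    intro s hs _ _
    simp only [pvRep]
    intro hp
    exact hs (List.prefix_nil.mp hp)
  | cons c tl ih =>
    intro s hs hcross hnp
    by_cases hb : t ≠ [] ∧ t.isPrefixOf (c :: tl)
    · rw [pvRep, if_pos hb]
      intro hp
      have h1 := head?_of_prefix hp hs
      cases s with
      | nil => exact hs rfl
      | cons a b =>
        cases r with
        | nil => exact hr rfl
        | cons x y =>
          simp only [List.cons_append, List.head?_cons, Option.some.injEq] at h1
          exact hcross a (by simp) (by simp [h1])
    · rw [pvRep, if_neg hb]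
      cases s with
      | nil => exact absurd rfl hs
      | cons a b =>
        intro hp
        obtain ⟨rfl, hb'⟩ := List.cons_prefix_cons.mp hp
        by_cases hbe : b = []
        · subst hbe
          exact hnp (by simp)
        · have hnb : ¬ b <+: tl := fun hx => hnp (List.cons_prefix_cons.mpr ⟨rfl, hx⟩)
          exact ih b hbe (fun x hx => hcross x (by simp [hx])) hnb hb'

-- pass-through: pvRep distributes over a prefix no t-occurrence starts in
theorem pvRep_append_aux (t r : List Char) :
    ∀ (p X : List Char), (∀ k, k < p.length → ¬ t <+: p.drop k ++ X) →
      pvRep t r (p ++ X) = p ++ pvRep t r X := by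
  intro p
  induction p with
  | nil => intro X _; simp
  | cons c p' ih =>
    intro X hH
    have h0 : ¬ t <+: (c :: p') ++ X := by simpa using hH 0 (by simp)
    rw [List.cons_append, pvRep, if_neg (by
      simp only [List.isPrefixOf_iff_prefix, not_and]
      intro _
      simpa using h0)]
    rw [ih X (fun k hk => by simpa using hH (k + 1) (by simp; omega))]
    simp

theorem pvRep_append (t r p : List Char) (hp : p ≠ []) (ht : t ≠ [])
    (h1 : ¬ t <+: p) (h2 : ¬ p <+: t) (h3 : ∀ c ∈ p.tail, t.head? ≠ some c) :
    ∀ X, pvRep t r (p ++ X) = p ++ pvRep t r X := by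
  intro X
  apply pvRep_append_aux
  intro k hk hpre
  match k with
  | 0 =>
    simp only [List.drop_zero] at hpre
    rcases Nat.le_total t.length p.length with hle | hle
    · exact h1 (List.prefix_of_prefix_length_le hpre (List.prefix_append p X) hle)
    · exact h2 (List.prefix_of_prefix_length_le (List.prefix_append p X) hpre hle)
  | k + 1 =>
    have hdn : p.drop (k + 1) ≠ [] := by
      intro h; rw [List.drop_eq_nil_iff] at h; omega
    obtain ⟨a, b, hab⟩ := List.exists_cons_of_ne_nil hdn
    have hhead := head?_of_prefix hpre ht
    have htl : p.tail.drop k = p.drop (k + 1) := by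
      rw [← List.drop_one, List.drop_drop, Nat.add_comm]
    have hmem : a ∈ p.tail := by
      have hsuf : p.drop (k + 1) <:+ p.tail := htl ▸ List.drop_suffix k p.tail
      exact hsuf.subset (by simp [hab])
    exact h3 a hmem (by rw [← hhead, hab]; simp)

def pvFold (ps : List (List Char × List Char)) (l : List Char) : List Char :=
  ps.foldl (fun s p => pvRep p.1 p.2 s) l

theorem pvFold_nil : ∀ ps, pvFold ps [] = [] := by
  intro ps
  induction ps with
  | nil => rfl
  | cons p rest ih => simpa [pvFold, pvRep] using ih

theorem pvFold_append (ps : List (List Char × List Char)) (p0 : List Char) (hp0 : p0 ≠ [])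
    (h : ∀ p ∈ ps, p.1 ≠ [] ∧ ¬ p.1 <+: p0 ∧ ¬ p0 <+: p.1 ∧ (∀ c ∈ p0.tail, p.1.head? ≠ some c)) :
    ∀ X, pvFold ps (p0 ++ X) = p0 ++ pvFold ps X := by
  induction ps with
  | nil => intro X; simp [pvFold]
  | cons p rest ih =>
    intro X
    obtain ⟨h1, h2, h3, h4⟩ := h p (by simp)
    have := pvRep_append p.1 p.2 p0 hp0 h1 h2 h3 h4 X
    simp only [pvFold, List.foldl_cons] at *
    rw [this]
    exact ih (fun q hq => h q (by simp [hq])) (pvRep p.1 p.2 X)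

theorem pvFold_cons (ps : List (List Char × List Char)) (c : Char)
    (hglob : ∀ p ∈ ps, p.1 ≠ [] ∧ p.2 ≠ [] ∧ (∀ x ∈ p.1.tail, ∀ q ∈ ps, q.2.head? ≠ some x)) :
    ∀ Z, (∀ p ∈ ps, p.1.head? = some c → p.1.tail ≠ [] ∧ ¬ p.1.tail <+: Z) →
      pvFold ps (c :: Z) = c :: pvFold ps Z := by
  induction ps with
  | nil => intro Z _; simp [pvFold]
  | cons p rest ih =>
    intro Z hZ
    obtain ⟨hp1, hp2, hpcross⟩ := hglob p (by simp)
    have hstep : pvRep p.1 p.2 (c :: Z) = c :: pvRep p.1 p.2 Z := by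
      rw [pvRep, if_neg]
      · intro ⟨_, hpre⟩
        rw [List.isPrefixOf_iff_prefix] at hpre
        cases hp : p.1 with
        | nil => exact hp1 hp
        | cons a b =>
          rw [hp] at hpre
          obtain ⟨rfl, hbb⟩ := List.cons_prefix_cons.mp hpre
          obtain ⟨htne, htnp⟩ := hZ p (by simp) (by simp [hp])
          exact htnp (by simpa [hp] using hbb)
    simp only [pvFold, List.foldl_cons] at *
    rw [hstep]
    apply ih (fun q hq => by
      obtain ⟨a, b, cr⟩ := hglob q (by simp [hq])
      exact ⟨a, b, fun x hx q' hq' => cr x hx q' (by simp [hq'])⟩)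
    intro q hq hqc
    obtain ⟨htne, htnp⟩ := hZ q (by simp [hq]) hqc
    refine ⟨htne, pvRep_not_prefix p.1 p.2 hp2 Z q.1.tail htne ?_ htnp⟩
    intro x hx
    exact (hglob q (by simp [hq])).2.2 x hx p (by simp)

theorem pvFind_none {ps : List (List Char × List Char)} {l : List Char}
    (h : pvFind ps l = none) : ∀ p ∈ ps, ¬ p.1 <+: l := by
  induction ps with
  | nil => simp
  | cons p rest ih =>
    by_cases hp : p.1.isPrefixOf l
    · simp [pvFind, hp] at h
    · simp [pvFind, hp] at h
      intro q hq
      rcases List.mem_cons.mp hq with rfl | hq'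
      · rw [← List.isPrefixOf_iff_prefix]; simp [hp]
      · exact ih h q hq'

theorem pvFind_some {ps : List (List Char × List Char)} {l : List Char}
    {q : List Char × List Char} (h : pvFind ps l = some q) :
    q.1 <+: l ∧ ∃ ps1 ps2, ps = ps1 ++ q :: ps2 ∧ ∀ p ∈ ps1, ¬ p.1 <+: l := by
  induction ps with
  | nil => simp [pvFind] at h
  | cons p rest ih =>
    by_cases hp : p.1.isPrefixOf l
    · simp [pvFind, hp] at h
      subst h
      exact ⟨List.isPrefixOf_iff_prefix.mp hp, [], rest, by simp, by simp⟩
    · simp [pvFind, hp] at h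
      obtain ⟨h1, ps1, ps2, rfl, h2⟩ := ih h
      refine ⟨h1, p :: ps1, ps2, by simp, ?_⟩
      intro p' hp'
      rcases List.mem_cons.mp hp' with rfl | hmem
      · rw [← List.isPrefixOf_iff_prefix]; simp [hp]
      · exact h2 p' hmem

-- decidable global facts about the concrete token table
theorem pvGlob_ne : ∀ p ∈ pvMapping, p.1 ≠ [] ∧ p.2 ≠ [] := by simp only [pvMapping_eq]; decide
theorem pvGlob_len2 : ∀ p ∈ pvMapping, 2 ≤ p.1.length := by simp only [pvMapping_eq]; decide
theorem pvGlob_cross_b : (pvMapping.all (fun p => p.1.tail.all (fun x =>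
    pvMapping.all (fun q => q.2.head? != some x)))) = true := by
  simp only [pvMapping_eq]; decide

theorem pvGlob_cross : ∀ p ∈ pvMapping, ∀ x ∈ p.1.tail, ∀ q ∈ pvMapping, q.2.head? ≠ some x := by
  intro p hp x hx q hq
  simpa using List.all_eq_true.mp (List.all_eq_true.mp
    (List.all_eq_true.mp pvGlob_cross_b p hp) x hx) q hq
theorem pvGlob_pf : ∀ p ∈ pvMapping, ∀ q ∈ pvMapping, p.1 ≠ q.1 → ¬ p.1 <+: q.1 := by
  simp only [pvMapping_eq]; decide
theorem pvGlob_tokTail_b : (pvMapping.all (fun p => pvMapping.all (fun q =>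
    q.1.tail.all (fun c => p.1.head? != some c)))) = true := by
  simp only [pvMapping_eq]; decide

theorem pvGlob_tokTail : ∀ p ∈ pvMapping, ∀ q ∈ pvMapping, ∀ c ∈ q.1.tail, p.1.head? ≠ some c := by
  intro p hp q hq c hc
  simpa using List.all_eq_true.mp (List.all_eq_true.mp
    (List.all_eq_true.mp pvGlob_tokTail_b p hp) q hq) c hc
theorem pvGlob_rep_b : (pvMapping.all (fun p => pvMapping.all (fun q =>
    !(p.1.isPrefixOf q.2) && !(q.2.isPrefixOf p.1) &&
      q.2.tail.all (fun c => p.1.head? != some c)))) = true := by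
  simp only [pvMapping_eq]; decide

theorem pvGlob_rep : ∀ p ∈ pvMapping, ∀ q ∈ pvMapping,
    ¬ p.1 <+: q.2 ∧ ¬ q.2 <+: p.1 ∧ ∀ c ∈ q.2.tail, p.1.head? ≠ some c := by
  intro p hp q hq
  have h := List.all_eq_true.mp (List.all_eq_true.mp pvGlob_rep_b p hp) q hq
  simp only [Bool.and_eq_true, List.all_eq_true] at h
  refine ⟨?_, ?_, fun c hc => by simpa using h.2 c hc⟩
  · intro hx
    rw [← List.isPrefixOf_iff_prefix] at hx
    simp [hx] at h
  · intro hx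
    rw [← List.isPrefixOf_iff_prefix] at hx
    simp [hx] at h

theorem pvRep_self (t r Y : List Char) (ht : t ≠ []) :
    pvRep t r (t ++ Y) = r ++ pvRep t r Y := by
  obtain ⟨c, tk, rfl⟩ := List.exists_cons_of_ne_nil ht
  rw [List.cons_append, pvRep, if_pos ⟨ht, by
    rw [List.isPrefixOf_iff_prefix, ← List.cons_append]
    exact List.prefix_append _ _⟩]
  congr 1
  rw [← List.cons_append, List.drop_left]

theorem pvMain : ∀ (n : Nat) (l : List Char), l.length ≤ n → pvFold pvMapping l = pvScan l := by
  intro n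
  induction n with
  | zero =>
    intro l hl
    have : l = [] := List.length_eq_zero_iff.mp (Nat.le_zero.mp hl)
    subst this
    rw [pvFold_nil, pvScan]
  | succ n ih =>
    intro l hl
    cases l with
    | nil => rw [pvFold_nil, pvScan]
    | cons c t =>
      cases hfind : pvFind pvMapping (c :: t) with
      | none =>
        have hnm := pvFind_none hfind
        have hscan : pvScan (c :: t) = c :: pvScan t := by rw [pvScan, hfind]
        rw [hscan]
        rw [pvFold_cons pvMapping c
          (fun p hp => ⟨(pvGlob_ne p hp).1, (pvGlob_ne p hp).2, pvGlob_cross p hp⟩) t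
          (fun p hp hpc => by
            have hlen := pvGlob_len2 p hp
            obtain ⟨a, b, hab⟩ := List.exists_cons_of_ne_nil (pvGlob_ne p hp).1
            have ha : a = c := by rw [hab] at hpc; simpa using hpc
            subst ha
            constructor
            · rw [hab]
              simp only [List.tail_cons]
              intro hbnil
              rw [hab, hbnil] at hlen
              simp at hlen
            · intro hbp
              refine hnm p hp ?_
              rw [hab] at hbp ⊢
              simp only [List.tail_cons] at hbp
              exact List.cons_prefix_cons.mpr ⟨rfl, hbp⟩),
          ih t (by simp at hl; omega)]
      | some q =>
        obtain ⟨hpre, ps1, ps2, hsplit, hps1⟩ := pvFind_some hfind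
        have hqmem : q ∈ pvMapping := by rw [hsplit]; simp
        have hq1ne := (pvGlob_ne q hqmem).1
        obtain ⟨rest, hrest⟩ := hpre
        have hdrop : (c :: t).drop q.1.length = rest := by
          rw [← hrest, List.drop_left]
        have hscan : pvScan (c :: t) = q.2 ++ pvScan rest := by
          rw [pvScan, hfind]
          exact congrArg (q.2 ++ ·) (congrArg pvScan hdrop)
        have hps1mem : ∀ p ∈ ps1, p ∈ pvMapping := by
          intro p hp; rw [hsplit]; simp [hp]
        have hlrest : rest.length ≤ n := by
          have hle := congrArg List.length hrest
          have hlen := pvGlob_len2 q hqmem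
          simp at hle hl; omega
        rw [hscan]
        calc pvFold pvMapping (c :: t)
            = pvFold ps2 (pvRep q.1 q.2 (pvFold ps1 (q.1 ++ rest))) := by
              rw [← hrest, hsplit]; simp [pvFold]
          _ = pvFold ps2 (pvRep q.1 q.2 (q.1 ++ pvFold ps1 rest)) := by
              rw [pvFold_append ps1 q.1 hq1ne (fun p hp => by
                have hpm := hps1mem p hp
                have hnpl := hps1 p hp
                refine ⟨(pvGlob_ne p hpm).1, ?_, ?_, pvGlob_tokTail p hpm q hqmem⟩
                · intro hx; exact hnpl (hx.trans ⟨rest, hrest⟩)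
                · intro hx
                  by_cases he : p.1 = q.1
                  · exact hnpl (he ▸ (⟨rest, hrest⟩ : q.1 <+: c :: t))
                  · exact pvGlob_pf q hqmem p hpm (fun h => he h.symm) hx) rest]
          _ = pvFold ps2 (q.2 ++ pvRep q.1 q.2 (pvFold ps1 rest)) := by
              rw [pvRep_self q.1 q.2 (pvFold ps1 rest) hq1ne]
          _ = q.2 ++ pvFold ps2 (pvRep q.1 q.2 (pvFold ps1 rest)) := by
              rw [pvFold_append ps2 q.2 (pvGlob_ne q hqmem).2 (fun p hp => by
                have hpm : p ∈ pvMapping := by rw [hsplit]; simp [hp]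
                obtain ⟨a, b, cc⟩ := pvGlob_rep p hpm q hqmem
                exact ⟨(pvGlob_ne p hpm).1, a, b, cc⟩)]
          _ = q.2 ++ pvFold pvMapping rest := by rw [hsplit]; simp [pvFold]
          _ = q.2 ++ pvScan rest := by rw [ih rest hlrest]

theorem strRep_eq (s o n : String) (ho : o.toList ≠ []) :
    PySem.Str.replace s o n = String.ofList (pvRep o.toList n.toList s.toList) := by
  show String.ofList _ = _
  rw [replace_eq_pvRep _ _ _ ho]

set_option maxRecDepth 4000 in
theorem pvA_eq (text : String) :
    html_to_discord text = String.ofList (pvFold pvMapping text.toList) := by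
  unfold html_to_discord
  simp only [List.foldl_cons, List.foldl_nil]
  rw [strRep_eq _ _ _ (by decide), strRep_eq _ _ _ (by decide),
      strRep_eq _ _ _ (by decide), strRep_eq _ _ _ (by decide),
      strRep_eq _ _ _ (by decide), strRep_eq _ _ _ (by decide),
      strRep_eq _ _ _ (by decide), strRep_eq _ _ _ (by decide),
      strRep_eq _ _ _ (by decide), strRep_eq _ _ _ (by decide)]
  rw [pvMapping_eq]
  simp only [pvFold, List.foldl_cons, List.foldl_nil, String.toList_ofList]
  rfl

-- ===== VERDICT (by name: the statement is the Claim_ definition above) =====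
theorem html_to_discord_spec : Claim_equal_html_to_discord := by
  intro text _
  unfold Spec_html_to_discord html_to_discord_alt
  rw [pvA_eq]
  exact congrArg String.ofList (pvMain text.toList.length text.toList le_rfl)
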